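-- pv_equiv track=rewrite | github.com/lizhaoliu-Lec/Revisiting_Deep_Metric_Learning_PyTorch | dataset/concat_dataloader.py | generate_idx_to_dataset_idx
-- ===== SOURCE A (Python) =====
-- def generate_idx_to_dataset_idx(polling_strategy, dataset_remain_count):
--     idx_to_dataset_idx = {}
--     length = sum([v for v in dataset_remain_count.values()])
--     if polling_strategy == 'batch_wise':
--         idx = 0
--         while idx < length:
--             for dataset_idx in dataset_remain_count.keys():
--                 if dataset_remain_count[dataset_idx] > 0:
--                     idx_to_dataset_idx[idx] = dataset_idx
--                     idx += 1
--                     dataset_remain_count[dataset_idx] -= 1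
--     if polling_strategy == 'dataset_wise':
--         idx = 0
--         while idx < length:
--             for dataset_idx in dataset_remain_count.keys():
--                 while dataset_remain_count[dataset_idx] > 0:
--                     idx_to_dataset_idx[idx] = dataset_idx
--                     idx += 1
--                     dataset_remain_count[dataset_idx] -= 1
--
--     return idx_to_dataset_idx
-- ===== SOURCE B (Python) =====
-- def generate_idx_to_dataset_idx(polling_strategy, dataset_remain_count):
--     idx_to_dataset_idx = {}
--     idx = 0
--     if polling_strategy == 'batch_wise':
--         # round-robin over a shrinking list of still-active datasets:
--         # exhausted datasets drop out instead of being rescanned every round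
--         active = [(k, v) for k, v in dataset_remain_count.items() if v > 0]
--         while active:
--             nxt = []
--             for k, v in active:
--                 idx_to_dataset_idx[idx] = k
--                 idx += 1
--                 if v > 1:
--                     nxt.append((k, v - 1))
--             active = nxt
--     elif polling_strategy == 'dataset_wise':
--         for k, v in dataset_remain_count.items():
--             for _ in range(v):
--                 idx_to_dataset_idx[idx] = k
--                 idx += 1
--     return idx_to_dataset_idx
-- ===== Notes on version B (the rewrite author's own statement) =====
-- stated objective: alternative
-- what changed: B polls a shrinking active list (exhausted datasets drop out of the round-robin, no count dict is mutated or rescanned) and writes the dataset_wise case as two plain for-loops, instead of A's while-loop passes over every key with dict lookups, in-place decrements and a running length check.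
-- outside the precondition, e.g. on generate_idx_to_dataset_idx('batch_wise', {0: 2, 1: -1}): A returns {0: 0}, B returns {0: 0, 1: 0}; on generate_idx_to_dataset_idx('dataset_wise', {0: 2, 1: -3}): A returns {}, B returns {0: 0, 1: 0}
import Mathlib
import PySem

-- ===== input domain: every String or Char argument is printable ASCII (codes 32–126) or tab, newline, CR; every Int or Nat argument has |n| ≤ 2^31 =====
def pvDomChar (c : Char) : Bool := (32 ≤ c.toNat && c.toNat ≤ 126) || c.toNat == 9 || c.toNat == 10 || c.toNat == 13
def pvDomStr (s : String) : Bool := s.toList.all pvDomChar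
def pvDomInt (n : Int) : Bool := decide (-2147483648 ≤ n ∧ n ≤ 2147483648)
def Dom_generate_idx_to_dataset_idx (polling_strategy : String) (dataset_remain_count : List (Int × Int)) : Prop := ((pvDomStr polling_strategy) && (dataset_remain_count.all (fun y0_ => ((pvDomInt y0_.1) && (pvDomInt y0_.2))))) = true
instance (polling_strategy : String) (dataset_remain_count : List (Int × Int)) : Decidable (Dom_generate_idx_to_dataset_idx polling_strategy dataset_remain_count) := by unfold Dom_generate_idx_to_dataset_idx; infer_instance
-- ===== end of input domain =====

-- B replaces A's repeated full scans (every round rescans every dataset key and mutates the count dict in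
-- place) by round-robin over a shrinking active list, so exhausted datasets drop out of the loop.
-- Equivalence is about the RETURN value only: Python A mutates dataset_remain_count in place (decrements
-- its counts to 0), B leaves it untouched.


-- ===== PORT A =====

-- state of A's loops: (idx_to_dataset_idx, idx, dataset_remain_count)

abbrev pvSt := PySem.Dict Int Int × Int × PySem.Dict Int Int

-- body of the `for dataset_idx in ...keys()` loop of the batch_wise branch
-- (dataset_remain_count[dataset_idx] is getD: the key comes from .keys(), so a KeyError is impossible)

def pvAStep (st : pvSt) (k : Int) : pvSt :=
  if st.2.2.getD k 0 > 0 then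
    (st.1.insert st.2.1 k, st.2.1 + 1, st.2.2.insert k (st.2.2.getD k 0 - 1))
  else st

def pvAPass (st : pvSt) : pvSt := st.2.2.keys.foldl pvAStep st

-- `while idx < length` of the batch_wise branch; the fuel is a totality device only: every executed pass
-- makes at least one assignment, so sum(max(v,0)) + 1 passes are never exhausted (the proofs never cut a loop short)

def pvALoopB : Nat → Int → pvSt → pvSt
  | 0, _, st => st
  | fuel+1, length, st => if st.2.1 < length then pvALoopB fuel length (pvAPass st) else st

-- inner `while dataset_remain_count[dataset_idx] > 0` of the dataset_wise branch; its fuel count.toNat + 1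
-- is exact: each iteration decrements the count by exactly 1

def pvADisp : Nat → Int → pvSt → pvSt
  | 0, _, st => st
  | fuel+1, k, st =>
    if st.2.2.getD k 0 > 0 then
      pvADisp fuel k (st.1.insert st.2.1 k, st.2.1 + 1, st.2.2.insert k (st.2.2.getD k 0 - 1))
    else st

def pvAPassD (st : pvSt) : pvSt :=
  st.2.2.keys.foldl (fun st k => pvADisp ((st.2.2.getD k 0).toNat + 1) k st) st

-- `while idx < length` of the dataset_wise branch (same fuel bound as the batch_wise loop)

def pvALoopD : Nat → Int → pvSt → pvSt
  | 0, _, st => st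
  | fuel+1, length, st => if st.2.1 < length then pvALoopD fuel length (pvAPassD st) else st

def generate_idx_to_dataset_idx (polling_strategy : String) (dataset_remain_count : List (Int × Int)) : List (Int × Int) :=
  let d0 := PySem.Dict.ofList dataset_remain_count
  let length := d0.values.sum
  let fuel := (d0.values.map Int.toNat).sum + 1
  let st0 : pvSt := (PySem.Dict.empty, 0, d0)
  let st1 := if polling_strategy == "batch_wise" then pvALoopB fuel length st0 else st0
  let st2 := if polling_strategy == "dataset_wise" then pvALoopD fuel length st1 else st1
  st2.1.items


-- ===== PORT B =====

-- one round over the active list: assign one index per dataset, keep (k, v-1) only while still active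

def pvBPass (st : PySem.Dict Int Int × Int) (active : List (Int × Int)) :
    PySem.Dict Int Int × Int × List (Int × Int) :=
  active.foldl (fun acc p =>
      (acc.1.insert acc.2.1 p.1, acc.2.1 + 1, if p.2 > 1 then acc.2.2 ++ [(p.1, p.2 - 1)] else acc.2.2))
    (st.1, st.2, [])

-- `while active:`, with the same never-exhausted fuel device

def pvBLoop : Nat → PySem.Dict Int Int × Int → List (Int × Int) → PySem.Dict Int Int × Int
  | 0, st, _ => st
  | fuel+1, st, active =>
    if active.isEmpty then st
    else
      let r := pvBPass st active
      pvBLoop fuel (r.1, r.2.1) r.2.2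

def generate_idx_to_dataset_idx_alt (polling_strategy : String) (dataset_remain_count : List (Int × Int)) : List (Int × Int) :=
  let items := (PySem.Dict.ofList dataset_remain_count).items
  if polling_strategy == "batch_wise" then
    let active := items.filter (fun p => p.2 > 0)
    let fuel := (active.map (fun p => p.2.toNat)).sum + 1
    (pvBLoop fuel (PySem.Dict.empty, 0) active).1.items
  else if polling_strategy == "dataset_wise" then
    (items.foldl (fun (st : PySem.Dict Int Int × Int) p =>
        (List.range p.2.toNat).foldl (fun st _ => (st.1.insert st.2 p.1, st.2 + 1)) st)
      (PySem.Dict.empty, 0)).1.items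
  else []


-- ===== PRECONDITION & SPEC =====
-- Pre_ restricts to the function's natural domain: dataset_remain_count stands for a Python dict of remaining
-- sample counts, so its keys are distinct and — when one of the two polling strategies is actually selected —
-- its counts nonnegative; with a negative count A's `idx < length` bookkeeping truncates or overshoots the
-- mapping, while B simply dispenses every positive count.
def Pre_generate_idx_to_dataset_idx (polling_strategy : String) (dataset_remain_count : List (Int × Int)) : Prop :=
  (dataset_remain_count.map Prod.fst).Nodup ∧
    ((polling_strategy = "batch_wise" ∨ polling_strategy = "dataset_wise") →
      ∀ p ∈ dataset_remain_count, 0 ≤ p.2)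

instance (polling_strategy : String) (dataset_remain_count : List (Int × Int)) : Decidable (Pre_generate_idx_to_dataset_idx polling_strategy dataset_remain_count) := by unfold Pre_generate_idx_to_dataset_idx; infer_instance

def pvWitness_generate_idx_to_dataset_idx : String × (List (Int × Int)) := ("batch_wise", [(0, 2), (1, 1)])

def Spec_generate_idx_to_dataset_idx (polling_strategy : String) (dataset_remain_count : List (Int × Int)) (out : List (Int × Int)) : Prop := out = generate_idx_to_dataset_idx_alt polling_strategy dataset_remain_count
instance (polling_strategy : String) (dataset_remain_count : List (Int × Int)) (out : List (Int × Int)) : Decidable (Spec_generate_idx_to_dataset_idx polling_strategy dataset_remain_count out) := by unfold Spec_generate_idx_to_dataset_idx; infer_instance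

-- ===== CLAIM (what is proved, stated in full; the proofs are below) =====
def Claim_equal_generate_idx_to_dataset_idx : Prop := ∀ (polling_strategy : String) (dataset_remain_count : List (Int × Int)), Dom_generate_idx_to_dataset_idx polling_strategy dataset_remain_count → Pre_generate_idx_to_dataset_idx polling_strategy dataset_remain_count → Spec_generate_idx_to_dataset_idx polling_strategy dataset_remain_count (generate_idx_to_dataset_idx polling_strategy dataset_remain_count)

-- ===== LEMMAS AND PROOFS =====


-- shared normal form of both result-building loops: insert key k at the running index

def pvIns (st : PySem.Dict Int Int × Int) (k : Int) : PySem.Dict Int Int × Int :=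
  (st.1.insert st.2 k, st.2 + 1)

def pvInsSeq (st : PySem.Dict Int Int × Int) (ks : List Int) : PySem.Dict Int Int × Int :=
  ks.foldl pvIns st

theorem pvInsSeq_append (st : PySem.Dict Int Int × Int) (xs ys : List Int) :
    pvInsSeq st (xs ++ ys) = pvInsSeq (pvInsSeq st xs) ys := by
  simp [pvInsSeq]

theorem pvInsSeq_snd (st : PySem.Dict Int Int × Int) (ks : List Int) :
    (pvInsSeq st ks).2 = st.2 + ks.length := by
  induction ks generalizing st with
  | nil => simp [pvInsSeq]
  | cons k ks ih => simpa [pvInsSeq, pvIns, add_assoc, add_comm, add_left_comm] using ih (pvIns st k)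

theorem pv_ofList_items (l : List (Int × Int)) (h : (l.map Prod.fst).Nodup) :
    (PySem.Dict.ofList l).items = l := by
  have := PySem.Dict.items_foldl_insert_fresh (l := l) (k := Prod.fst) (v := Prod.snd)
    (d := PySem.Dict.empty) (by intro a _; simp [PySem.Dict.contains_empty]) h
  simpa [PySem.Dict.ofList, PySem.Dict.update] using this

theorem pv_passA_spec (ks : List Int) : ∀ (res : PySem.Dict Int Int) (idx : Int)
    (d : PySem.Dict Int Int), d.keys.Nodup → ks.Sublist d.keys →
    ks.foldl pvAStep (res, idx, d) =
      ((pvInsSeq (res, idx) (ks.filter (fun k => d.getD k 0 > 0))).1,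
       (pvInsSeq (res, idx) (ks.filter (fun k => d.getD k 0 > 0))).2,
       PySem.Dict.mk (d.items.map (fun p => if p.1 ∈ ks ∧ 0 < p.2 then (p.1, p.2 - 1) else p))) := by
  induction ks with
  | nil => intro res idx d hnd hks; simp [pvInsSeq]
  | cons k ks ih =>
    intro res idx d hnd hks
    have hkmem : k ∈ d.keys := hks.subset (List.mem_cons_self ..)
    have hksub : ks.Sublist d.keys := (List.sublist_cons_self k ks).trans hks
    have hknotin : k ∉ ks := by
      have hnd2 : (k :: ks).Nodup := hks.nodup hnd
      exact (List.nodup_cons.mp hnd2).1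
    have hcont : d.contains k = true := (PySem.Dict.contains_iff_mem_keys d k).mpr hkmem
    by_cases hv : 0 < d.getD k 0
    · have hstep : pvAStep (res, idx, d) k
          = (res.insert idx k, idx + 1, d.insert k (d.getD k 0 - 1)) := by
        simp [pvAStep, hv]
      have hkeys1 : (d.insert k (d.getD k 0 - 1)).keys = d.keys :=
        PySem.Dict.keys_insert_of_contains d _ hcont
      have hnd1 : (d.insert k (d.getD k 0 - 1)).keys.Nodup := by rw [hkeys1]; exact hnd
      have hks1 : ks.Sublist (d.insert k (d.getD k 0 - 1)).keys := by rw [hkeys1]; exact hksub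
      have hgetD1 : ∀ x ∈ ks, (d.insert k (d.getD k 0 - 1)).getD x 0 = d.getD x 0 := by
        intro x hx
        exact PySem.Dict.getD_insert_of_ne d _ _ (by rintro rfl; exact hknotin hx)
      have hfilter : ks.filter (fun x => (d.insert k (d.getD k 0 - 1)).getD x 0 > 0)
          = ks.filter (fun x => d.getD x 0 > 0) := by
        apply List.filter_congr; intro x hx; simp [hgetD1 x hx]
      have hitems1 : (d.insert k (d.getD k 0 - 1)).items
          = d.items.map (fun p => if p.1 == k then (k, d.getD k 0 - 1) else p) :=
        PySem.Dict.items_insert_of_contains d _ hcont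
      rw [List.foldl_cons, hstep, ih _ _ _ hnd1 hks1]
      refine congrArg₂ _ ?_ (congrArg₂ _ ?_ ?_)
      · rw [hfilter]; simp [List.filter_cons, hv, pvInsSeq, pvIns]
      · rw [hfilter]; simp [List.filter_cons, hv, pvInsSeq, pvIns]
      · apply congrArg
        rw [hitems1, List.map_map]
        apply List.map_congr_left
        intro p hp
        by_cases hpk : p.1 = k
        · have hpv : d.getD p.1 0 = p.2 :=
            PySem.Dict.getD_of_mem_items d (by simpa using hp) hnd 0
          rw [hpk] at hpv
          simp only [Function.comp, hpk, beq_self_eq_true, if_true]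
          rw [if_neg (by simp [hknotin]), if_pos ⟨List.mem_cons_self .., by omega⟩]
          simp [hpv]
        · simp only [Function.comp, beq_iff_eq, hpk, if_false, List.mem_cons]
          have : (p.1 = k ∨ p.1 ∈ ks) ↔ p.1 ∈ ks := by simp [hpk]
          simp [this]
    · have hstep : pvAStep (res, idx, d) k = (res, idx, d) := by simp [pvAStep, hv]
      rw [List.foldl_cons, hstep, ih _ _ _ hnd hksub]
      refine congrArg₂ _ ?_ (congrArg₂ _ ?_ ?_)
      · simp [List.filter_cons, hv]
      · simp [List.filter_cons, hv]
      · apply congrArg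
        apply List.map_congr_left
        intro p hp
        by_cases hpk : p.1 = k
        · have hpv : d.getD p.1 0 = p.2 :=
            PySem.Dict.getD_of_mem_items d (by simpa using hp) hnd 0
          rw [hpk] at hpv
          have hnp : ¬ (0 < p.2) := by omega
          simp [List.mem_cons, hpk, hnp, hknotin]
        · simp only [List.mem_cons]
          have : (p.1 = k ∨ p.1 ∈ ks) ↔ p.1 ∈ ks := by simp [hpk]
          simp [this]

theorem pv_passB_spec (active : List (Int × Int)) : ∀ (res : PySem.Dict Int Int) (idx : Int)
    (acc : List (Int × Int)),
    active.foldl (fun acc p =>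
        (acc.1.insert acc.2.1 p.1, acc.2.1 + 1, if p.2 > 1 then acc.2.2 ++ [(p.1, p.2 - 1)] else acc.2.2))
      (res, idx, acc) =
      ((pvInsSeq (res, idx) (active.map Prod.fst)).1,
       (pvInsSeq (res, idx) (active.map Prod.fst)).2,
       acc ++ active.filterMap (fun p => if p.2 > 1 then some (p.1, p.2 - 1) else none)) := by
  induction active with
  | nil => intro res idx acc; simp [pvInsSeq]
  | cons p active ih =>
    intro res idx acc
    rw [List.foldl_cons, ih]
    by_cases hp : p.2 > 1 <;>
      simp [hp, pvInsSeq, pvIns, List.filterMap_cons]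

theorem pv_sum_filter (l : List (Int × Int)) :
    ((l.filter (fun p => p.2 > 0)).map (fun p => p.2.toNat)).sum
      = (l.map (fun p => p.2.toNat)).sum := by
  induction l with
  | nil => rfl
  | cons p l ih =>
    by_cases hp : 0 < p.2
    · simp [List.filter_cons, hp, ih]
    · simp [List.filter_cons, hp, ih]; omega

theorem pv_filter_map_dec (l : List (Int × Int)) :
    ((l.map (fun p => if 0 < p.2 then (p.1, p.2 - 1) else p)).filter (fun p => p.2 > 0))
      = l.filterMap (fun p => if p.2 > 1 then some (p.1, p.2 - 1) else none) := by
  induction l with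
  | nil => rfl
  | cons p l ih =>
    rcases lt_trichotomy p.2 1 with h | h | h
    · have h1 : ¬ (0 < p.2 - 1) := by omega
      by_cases h0 : 0 < p.2
      · simp [h0, List.filter_cons, h1, ih, show ¬ (1:Int) < p.2 by omega]
      · simp [h0, List.filter_cons, ih, show ¬ (1:Int) < p.2 by omega, show ¬ (0:Int) < p.2 from h0]
    · simp [List.filter_cons, h, ih]
    · simp [List.filter_cons, show (0:Int) < p.2 by omega, show (0:Int) < p.2 - 1 by omega, h, ih]

theorem pv_filterMap_filter (l : List (Int × Int)) :
    ((l.filter (fun p => p.2 > 0)).filterMap (fun p => if p.2 > 1 then some (p.1, p.2 - 1) else none))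
      = l.filterMap (fun p => if p.2 > 1 then some (p.1, p.2 - 1) else none) := by
  induction l with
  | nil => rfl
  | cons p l ih =>
    by_cases h0 : 0 < p.2
    · simp [List.filter_cons, h0, List.filterMap_cons, ih]
    · simp [List.filter_cons, h0, List.filterMap_cons, show ¬ (1:Int) < p.2 by omega, ih]

theorem pv_sum_dec (l : List (Int × Int)) :
    ((l.map (fun p => if 0 < p.2 then (p.1, p.2 - 1) else p)).map (fun p => p.2)).sum
      = (l.map (fun p => p.2)).sum - ((l.filter (fun p => p.2 > 0)).length : Int) := by
  induction l with
  | nil => simp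
  | cons p l ih =>
    by_cases h0 : 0 < p.2
    · simp only [List.map_cons, List.filter_cons, h0, decide_true, if_true, List.sum_cons,
        List.length_cons]
      rw [ih]; push_cast; ring
    · simp only [List.map_cons, List.filter_cons, h0, decide_false, Bool.false_eq_true, if_false,
        List.sum_cons]
      rw [ih]; ring

theorem pv_sum_nonneg (l : List (Int × Int)) (h : ∀ p ∈ l, 0 ≤ p.2) :
    0 ≤ (l.map (fun p => p.2)).sum := by
  induction l with
  | nil => simp
  | cons p l ih =>
    have := h p (List.mem_cons_self ..)
    have ht : 0 ≤ (l.map (fun p => p.2)).sum := ih (fun q hq => h q (List.mem_cons_of_mem _ hq))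
    simp; omega

theorem pv_pos_iff (l : List (Int × Int)) (h : ∀ p ∈ l, 0 ≤ p.2) :
    (0 < (l.map (fun p => p.2)).sum) ↔ ∃ p ∈ l, 0 < p.2 := by
  induction l with
  | nil => simp
  | cons p l ih =>
    have hp := h p (List.mem_cons_self ..)
    have ht := pv_sum_nonneg l (fun q hq => h q (List.mem_cons_of_mem _ hq))
    have iht := ih (fun q hq => h q (List.mem_cons_of_mem _ hq))
    simp only [List.map_cons, List.sum_cons, List.mem_cons]
    constructor
    · intro hs
      by_cases h0 : 0 < p.2
      · exact ⟨p, Or.inl rfl, h0⟩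
      · obtain ⟨q, hq, hq0⟩ := iht.mp (by omega)
        exact ⟨q, Or.inr hq, hq0⟩
    · rintro ⟨q, (rfl | hq), hq0⟩
      · omega
      · have := iht.mpr ⟨q, hq, hq0⟩; omega

theorem pv_filter_items (d : PySem.Dict Int Int) (hnd : d.keys.Nodup) :
    d.items.filter (fun p => p.2 > 0)
      = (d.keys.filter (fun k => d.getD k 0 > 0)).map (fun k => (k, d.getD k 0)) := by
  conv_lhs => rw [PySem.Dict.items_eq_map_keys d hnd 0]
  rw [List.filter_map]
  rfl

theorem pv_stepAll_fst (p : Int × Int) :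
    (if 0 < p.2 then (p.1, p.2 - 1) else p).1 = p.1 := by split <;> rfl

theorem pv_loopB_eq (fuel : Nat) : ∀ (res : PySem.Dict Int Int) (idx length : Int)
    (d : PySem.Dict Int Int), d.keys.Nodup → (∀ p ∈ d.items, 0 ≤ p.2) →
    idx + d.values.sum = length →
    (pvALoopB fuel length (res, idx, d)).1
      = (pvBLoop fuel (res, idx) (d.items.filter (fun p => p.2 > 0))).1 := by
  induction fuel with
  | zero => intros; rfl
  | succ fuel ih =>
    intro res idx length d hnd hnn hlen
    have hvals : d.values = d.items.map (fun p => p.2) := rfl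
    have hex : (∃ p ∈ d.items, 0 < p.2) ↔ (d.items.filter (fun p => p.2 > 0)) ≠ [] := by
      rw [Ne, List.filter_eq_nil_iff]
      push_neg
      constructor
      · rintro ⟨p, hp, h0⟩; exact ⟨p, hp, by simp [h0]⟩
      · rintro ⟨p, hp, h0⟩; exact ⟨p, hp, by simpa using h0⟩
    have hcond : (idx < length) ↔ (d.items.filter (fun p => p.2 > 0)).isEmpty = false := by
      rw [hvals] at hlen
      rw [← Bool.not_eq_true, List.isEmpty_iff, ← Ne, ← hex, ← pv_pos_iff d.items hnn]
      omega
    by_cases hlt : idx < length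
    · have hne : (d.items.filter (fun p => p.2 > 0)).isEmpty = false := hcond.mp hlt
      have hA : pvALoopB (fuel+1) length (res, idx, d)
          = pvALoopB fuel length (pvAPass (res, idx, d)) := by
        simp [pvALoopB, hlt]
      have hB : pvBLoop (fuel+1) (res, idx) (d.items.filter (fun p => p.2 > 0))
          = pvBLoop fuel
              ((pvBPass (res, idx) (d.items.filter (fun p => p.2 > 0))).1,
               (pvBPass (res, idx) (d.items.filter (fun p => p.2 > 0))).2.1)
              (pvBPass (res, idx) (d.items.filter (fun p => p.2 > 0))).2.2 := by
        simp [pvBLoop, hne]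
      rw [hA, hB]
      -- characterize A's pass
      have hpassA : pvAPass (res, idx, d)
          = ((pvInsSeq (res, idx) (d.keys.filter (fun k => d.getD k 0 > 0))).1,
             (pvInsSeq (res, idx) (d.keys.filter (fun k => d.getD k 0 > 0))).2,
             PySem.Dict.mk (d.items.map (fun p => if p.1 ∈ d.keys ∧ 0 < p.2 then (p.1, p.2 - 1) else p))) :=
        pv_passA_spec d.keys res idx d hnd (List.Sublist.refl _)
      have hmapc : d.items.map (fun p => if p.1 ∈ d.keys ∧ 0 < p.2 then (p.1, p.2 - 1) else p)
          = d.items.map (fun p => if 0 < p.2 then (p.1, p.2 - 1) else p) := by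
        apply List.map_congr_left
        intro p hp
        have hpk : p.1 ∈ d.keys := List.mem_map_of_mem hp
        by_cases h0 : 0 < p.2 <;> simp [hpk, h0]
      -- characterize B's pass
      have hpassB : pvBPass (res, idx) (d.items.filter (fun p => p.2 > 0))
          = ((pvInsSeq (res, idx) ((d.items.filter (fun p => p.2 > 0)).map Prod.fst)).1,
             (pvInsSeq (res, idx) ((d.items.filter (fun p => p.2 > 0)).map Prod.fst)).2,
             [] ++ (d.items.filter (fun p => p.2 > 0)).filterMap
                (fun p => if p.2 > 1 then some (p.1, p.2 - 1) else none)) :=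
        pv_passB_spec (d.items.filter (fun p => p.2 > 0)) res idx []
      have hasg : (d.items.filter (fun p => p.2 > 0)).map Prod.fst
          = d.keys.filter (fun k => d.getD k 0 > 0) := by
        rw [pv_filter_items d hnd, List.map_map]
        have hid : (Prod.fst ∘ fun k => (k, d.getD k 0)) = id := rfl
        rw [hid, List.map_id]
      set asg := d.keys.filter (fun k => d.getD k 0 > 0) with hasgdef
      -- the new count dict
      set d' : PySem.Dict Int Int :=
        PySem.Dict.mk (d.items.map (fun p => if 0 < p.2 then (p.1, p.2 - 1) else p)) with hd'
      have hd'keys : d'.keys = d.keys := by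
        show (d.items.map _).map Prod.fst = d.items.map Prod.fst
        rw [List.map_map]
        exact List.map_congr_left (fun p _ => pv_stepAll_fst p)
      have hd'nn : ∀ p ∈ d'.items, 0 ≤ p.2 := by
        intro q hq
        obtain ⟨p, hp, rfl⟩ := List.mem_map.mp hq
        have := hnn p hp
        by_cases h0 : 0 < p.2 <;> simp [h0] <;> omega
      have hd'len : (pvInsSeq (res, idx) asg).2 + d'.values.sum = length := by
        rw [pvInsSeq_snd]
        have hsum : d'.values.sum
            = (d.items.map (fun p => p.2)).sum - ((d.items.filter (fun p => p.2 > 0)).length : Int) := by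
          have hv' : d'.values
              = (d.items.map (fun p => if 0 < p.2 then (p.1, p.2 - 1) else p)).map (fun p => p.2) := rfl
          rw [hv']
          exact pv_sum_dec d.items
        have hlength : asg.length = (d.items.filter (fun p => p.2 > 0)).length := by
          rw [← hasg, List.length_map]
        rw [hsum, hlength]
        rw [hvals] at hlen
        omega
      -- B's new active list equals the filter of d'
      have hactive' : d'.items.filter (fun p => p.2 > 0)
          = (d.items.filter (fun p => p.2 > 0)).filterMap
              (fun p => if p.2 > 1 then some (p.1, p.2 - 1) else none) := by
        show (d.items.map _).filter _ = _
        rw [pv_filter_map_dec, pv_filterMap_filter]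
      rw [hpassA, hmapc, hpassB, hasg, List.nil_append, ← hactive']
      exact ih _ _ _ d' (by rw [hd'keys]; exact hnd) hd'nn hd'len
    · have hemp : (d.items.filter (fun p => p.2 > 0)).isEmpty = true := by
        by_contra hc
        exact hlt (hcond.mpr (Bool.not_eq_true _ ▸ hc))
      simp [pvALoopB, pvBLoop, hlt, hemp]

theorem pv_disp_spec (n : Nat) : ∀ (res : PySem.Dict Int Int) (idx : Int)
    (d : PySem.Dict Int Int) (k : Int), d.getD k 0 = (n : Int) →
    pvADisp (n + 1) k (res, idx, d) =
      ((pvInsSeq (res, idx) (List.replicate n k)).1,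
       (pvInsSeq (res, idx) (List.replicate n k)).2,
       if 0 < n then d.insert k 0 else d) := by
  induction n with
  | zero =>
    intro res idx d k hget
    simp [pvADisp, hget, pvInsSeq]
  | succ n ihn =>
    intro res idx d k hget
    have hpos : (0:Int) < d.getD k 0 := by rw [hget]; exact_mod_cast Nat.succ_pos n
    have hstep : pvADisp (n + 1 + 1) k (res, idx, d)
        = pvADisp (n + 1) k (res.insert idx k, idx + 1, d.insert k (n : Int)) := by
      have : d.getD k 0 - 1 = (n : Int) := by rw [hget]; push_cast; ring
      simp only [pvADisp, hpos, if_pos, this]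
    rw [hstep, ihn _ _ _ _ (PySem.Dict.getD_insert_self d k (n:Int) 0)]
    have hrep : List.replicate (n+1) k = k :: List.replicate n k := rfl
    refine congrArg₂ _ ?_ (congrArg₂ _ ?_ ?_)
    · rw [hrep]; rfl
    · rw [hrep]; rfl
    · by_cases h0 : 0 < n
      · simp only [h0, if_true, Nat.succ_pos, PySem.Dict.insert_insert_self]
      · have hn0 : n = 0 := by omega
        subst hn0
        simp

theorem pv_passD_spec (ks : List Int) : ∀ (res : PySem.Dict Int Int) (idx : Int)
    (d : PySem.Dict Int Int), d.keys.Nodup → ks.Sublist d.keys → (∀ p ∈ d.items, 0 ≤ p.2) →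
    ks.foldl (fun st k => pvADisp ((st.2.2.getD k 0).toNat + 1) k st) (res, idx, d) =
      ((pvInsSeq (res, idx) (ks.flatMap (fun k => List.replicate (d.getD k 0).toNat k))).1,
       (pvInsSeq (res, idx) (ks.flatMap (fun k => List.replicate (d.getD k 0).toNat k))).2,
       PySem.Dict.mk (d.items.map (fun p => if p.1 ∈ ks then (p.1, 0) else p))) := by
  induction ks with
  | nil => intro res idx d hnd hks hnn; simp [pvInsSeq]
  | cons k ks ih =>
    intro res idx d hnd hks hnn
    have hkmem : k ∈ d.keys := hks.subset (List.mem_cons_self ..)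
    have hksub : ks.Sublist d.keys := (List.sublist_cons_self k ks).trans hks
    have hknotin : k ∉ ks := by
      have hnd2 : (k :: ks).Nodup := hks.nodup hnd
      exact (List.nodup_cons.mp hnd2).1
    have hcont : d.contains k = true := (PySem.Dict.contains_iff_mem_keys d k).mpr hkmem
    obtain ⟨p0, hp0, hp0k⟩ := List.mem_map.mp hkmem
    have hgetk : d.getD k 0 = p0.2 := by
      rw [← hp0k]
      exact PySem.Dict.getD_of_mem_items d (by simpa using hp0) hnd 0
    have hknn : 0 ≤ d.getD k 0 := hgetk ▸ hnn p0 hp0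
    have hgetn : d.getD k 0 = ((d.getD k 0).toNat : Int) := by omega
    rw [List.foldl_cons, pv_disp_spec _ _ _ _ _ hgetn]
    by_cases h0 : 0 < (d.getD k 0).toNat
    · simp only [h0, if_true]
      have hkeys1 : (d.insert k 0).keys = d.keys := PySem.Dict.keys_insert_of_contains d _ hcont
      have hitems1 : (d.insert k 0).items
          = d.items.map (fun p => if p.1 == k then (k, 0) else p) :=
        PySem.Dict.items_insert_of_contains d _ hcont
      have hnn1 : ∀ p ∈ (d.insert k 0).items, 0 ≤ p.2 := by
        rw [hitems1]
        intro q hq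
        obtain ⟨p, hp, rfl⟩ := List.mem_map.mp hq
        by_cases hpk : p.1 = k
        · simp [hpk]
        · simpa [hpk] using hnn p hp
      rw [ih _ _ _ (by rw [hkeys1]; exact hnd) (by rw [hkeys1]; exact hksub) hnn1]
      have hflat : ks.flatMap (fun x => List.replicate ((d.insert k 0).getD x 0).toNat x)
          = ks.flatMap (fun x => List.replicate (d.getD x 0).toNat x) := by
        apply List.flatMap_congr  -- maybe wrong name
        intro x hx
        rw [PySem.Dict.getD_insert_of_ne d _ _ (by rintro rfl; exact hknotin hx)]
      have hflat2 : (k :: ks).flatMap (fun x => List.replicate (d.getD x 0).toNat x)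
          = List.replicate (d.getD k 0).toNat k ++ ks.flatMap (fun x => List.replicate (d.getD x 0).toNat x) := by
        simp [List.flatMap_cons]
      refine congrArg₂ _ ?_ (congrArg₂ _ ?_ ?_)
      · rw [hflat, hflat2, pvInsSeq_append]
      · rw [hflat, hflat2, pvInsSeq_append]
      · apply congrArg
        rw [hitems1, List.map_map]
        apply List.map_congr_left
        intro p hp
        by_cases hpk : p.1 = k
        · simp [Function.comp, hpk, hknotin, List.mem_cons]
        · simp only [Function.comp, beq_iff_eq, hpk, if_false, List.mem_cons]
          have : (p.1 = k ∨ p.1 ∈ ks) ↔ p.1 ∈ ks := by simp [hpk]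
          simp [this]
    · have hn0 : (d.getD k 0).toNat = 0 := by omega
      rw [hn0]
      have hred : ((pvInsSeq (res, idx) (List.replicate 0 k)).1,
          (pvInsSeq (res, idx) (List.replicate 0 k)).2,
          if 0 < 0 then d.insert k 0 else d) = ((res, idx, d) : pvSt) := rfl
      rw [hred, ih _ _ _ hnd hksub hnn]
      refine congrArg₂ _ ?_ (congrArg₂ _ ?_ ?_)
      · simp [List.flatMap_cons, hn0, pvInsSeq]
      · simp [List.flatMap_cons, hn0, pvInsSeq]
      · apply congrArg
        apply List.map_congr_left
        intro p hp
        by_cases hpk : p.1 = k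
        · have hpv : d.getD p.1 0 = p.2 :=
            PySem.Dict.getD_of_mem_items d (by simpa using hp) hnd 0
          rw [hpk] at hpv
          have hz : p.2 = 0 := by omega
          rw [if_neg (by rw [hpk]; exact hknotin), if_pos (List.mem_cons.mpr (Or.inl hpk))]
          rw [← hz]
        · simp only [List.mem_cons]
          have : (p.1 = k ∨ p.1 ∈ ks) ↔ p.1 ∈ ks := by simp [hpk]
          simp [this]

theorem pv_range_fold (n : Nat) : ∀ (st : PySem.Dict Int Int × Int) (k : Int),
    (List.range n).foldl (fun st _ => (st.1.insert st.2 k, st.2 + 1)) st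
      = pvInsSeq st (List.replicate n k) := by
  induction n with
  | zero => intros; rfl
  | succ n ih =>
    intro st k
    rw [List.range_succ, List.foldl_append, ih, List.replicate_succ', pvInsSeq_append]
    rfl

theorem pv_bfoldD (l : List (Int × Int)) : ∀ (st : PySem.Dict Int Int × Int),
    l.foldl (fun (st : PySem.Dict Int Int × Int) p =>
        (List.range p.2.toNat).foldl (fun st _ => (st.1.insert st.2 p.1, st.2 + 1)) st) st
      = pvInsSeq st (l.flatMap (fun p => List.replicate p.2.toNat p.1)) := by
  induction l with
  | nil => intro st; rfl
  | cons p l ih =>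
    intro st
    rw [List.foldl_cons, pv_range_fold, ih, List.flatMap_cons, pvInsSeq_append]

theorem pv_flat_keys (d : PySem.Dict Int Int) (hnd : d.keys.Nodup) :
    d.keys.flatMap (fun k => List.replicate (d.getD k 0).toNat k)
      = d.items.flatMap (fun p => List.replicate p.2.toNat p.1) := by
  conv_rhs => rw [PySem.Dict.items_eq_map_keys d hnd 0]
  rw [List.flatMap_map]

theorem pv_sum_cast (l : List (Int × Int)) (h : ∀ p ∈ l, 0 ≤ p.2) :
    (l.map (fun p => p.2)).sum = (Nat.cast ((l.map (fun p => p.2.toNat)).sum : Nat) : Int) := by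
  induction l with
  | nil => simp
  | cons p l ih =>
    have hp := h p (List.mem_cons_self ..)
    have iht := ih (fun q hq => h q (List.mem_cons_of_mem _ hq))
    simp only [List.map_cons, List.sum_cons, Nat.cast_add]
    rw [iht]
    omega

theorem pv_flat_len (l : List (Int × Int)) :
    (l.flatMap (fun p => List.replicate p.2.toNat p.1)).length
      = (l.map (fun p => p.2.toNat)).sum := by
  rw [List.length_flatMap]
  simp

theorem pv_loopD_eq (d : PySem.Dict Int Int) (hnd : d.keys.Nodup)
    (hnn : ∀ p ∈ d.items, 0 ≤ p.2) :
    (pvALoopD ((d.items.map (fun p => p.2.toNat)).sum + 1) (d.values.sum) (PySem.Dict.empty, 0, d)).1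
      = (pvInsSeq (PySem.Dict.empty, 0) (d.items.flatMap (fun p => List.replicate p.2.toNat p.1))).1 := by
  have hvals : d.values = d.items.map (fun p => p.2) := rfl
  have hsum : d.values.sum = (Nat.cast ((d.items.map (fun p => p.2.toNat)).sum : Nat) : Int) := by
    rw [hvals]; exact pv_sum_cast d.items hnn
  cases hN : (d.items.map (fun p => p.2.toNat)).sum with
  | zero =>
    have hlen0 : d.values.sum = 0 := by rw [hsum, hN]; rfl
    have hflat : d.items.flatMap (fun p => List.replicate p.2.toNat p.1) = [] := by
      apply List.flatMap_eq_nil_iff.mpr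
      intro p hp
      have : p.2.toNat = 0 := by
        have := List.sum_eq_zero_iff.mp hN (p.2.toNat) (by
          exact List.mem_map.mpr ⟨p, hp, rfl⟩)
        exact this
      rw [this]; rfl
    rw [hflat, hlen0]
    rfl
  | succ N =>
    have hNpos : (0:Int) < d.values.sum := by rw [hsum, hN]; exact_mod_cast Nat.succ_pos N
    have h1 : pvALoopD (N + 1 + 1) d.values.sum (PySem.Dict.empty, 0, d)
        = pvALoopD (N + 1) d.values.sum (pvAPassD (PySem.Dict.empty, 0, d)) := by
      simp only [pvALoopD]
      rw [if_pos]
      exact hNpos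
    have hpass : pvAPassD (PySem.Dict.empty, 0, d)
        = ((pvInsSeq (PySem.Dict.empty, 0) (d.keys.flatMap (fun k => List.replicate (d.getD k 0).toNat k))).1,
           (pvInsSeq (PySem.Dict.empty, 0) (d.keys.flatMap (fun k => List.replicate (d.getD k 0).toNat k))).2,
           PySem.Dict.mk (d.items.map (fun p => if p.1 ∈ d.keys then (p.1, 0) else p))) :=
      pv_passD_spec d.keys PySem.Dict.empty 0 d hnd (List.Sublist.refl _) hnn
    have hidx : (pvInsSeq (PySem.Dict.empty, 0)
        (d.keys.flatMap (fun k => List.replicate (d.getD k 0).toNat k))).2 = d.values.sum := by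
      rw [pvInsSeq_snd, pv_flat_keys d hnd, pv_flat_len, hsum]
      ring
    have h2 : pvALoopD (N + 1) d.values.sum (pvAPassD (PySem.Dict.empty, 0, d))
        = pvAPassD (PySem.Dict.empty, 0, d) := by
      rw [hpass]
      simp only [pvALoopD]
      rw [if_neg]
      rw [hidx]
      omega
    rw [h1, h2, hpass, pv_flat_keys d hnd]

theorem pv_main (polling_strategy : String) (dataset_remain_count : List (Int × Int))
    (hnd : (dataset_remain_count.map Prod.fst).Nodup)
    (hnn : ∀ p ∈ dataset_remain_count, 0 ≤ p.2) :
    generate_idx_to_dataset_idx polling_strategy dataset_remain_count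
      = generate_idx_to_dataset_idx_alt polling_strategy dataset_remain_count := by
  have hitems : (PySem.Dict.ofList dataset_remain_count).items = dataset_remain_count :=
    pv_ofList_items dataset_remain_count hnd
  set d0 := PySem.Dict.ofList dataset_remain_count with hd0
  have hdnd : d0.keys.Nodup := by
    show (d0.items.map Prod.fst).Nodup
    rw [hitems]; exact hnd
  have hdnn : ∀ p ∈ d0.items, 0 ≤ p.2 := by rw [hitems]; exact hnn
  have hvals : d0.values = d0.items.map (fun p => p.2) := rfl
  have hmapmap : d0.values.map Int.toNat = d0.items.map (fun p => p.2.toNat) := by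
    rw [hvals, List.map_map]; rfl
  by_cases hb : polling_strategy == "batch_wise"
  · have hps : polling_strategy = "batch_wise" := eq_of_beq hb
    have hnotd : (polling_strategy == "dataset_wise") = false := by rw [hps]; decide
    unfold generate_idx_to_dataset_idx generate_idx_to_dataset_idx_alt
    rw [← hd0]
    simp only [hb, hnotd, if_true, if_false, Bool.false_eq_true]
    have hfuel : (d0.values.map Int.toNat).sum + 1
        = ((d0.items.filter (fun p => p.2 > 0)).map (fun p => p.2.toNat)).sum + 1 := by
      rw [hmapmap, pv_sum_filter]
    rw [hfuel]
    exact congrArg PySem.Dict.items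
      (pv_loopB_eq _ PySem.Dict.empty 0 d0.values.sum d0 hdnd hdnn (by ring))
  · by_cases hd : polling_strategy == "dataset_wise"
    · unfold generate_idx_to_dataset_idx generate_idx_to_dataset_idx_alt
      rw [← hd0]
      simp only [hb, hd, if_true, if_false, Bool.false_eq_true]
      rw [pv_bfoldD]
      refine congrArg PySem.Dict.items ?_
      have h := pv_loopD_eq d0 hdnd hdnn
      rw [← hmapmap] at h
      exact h
    · unfold generate_idx_to_dataset_idx generate_idx_to_dataset_idx_alt
      rw [← hd0]
      simp only [hb, hd, if_false, Bool.false_eq_true]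
      rfl


theorem pv_main_other (polling_strategy : String) (dataset_remain_count : List (Int × Int))
    (hb : (polling_strategy == "batch_wise") = false)
    (hd : (polling_strategy == "dataset_wise") = false) :
    generate_idx_to_dataset_idx polling_strategy dataset_remain_count
      = generate_idx_to_dataset_idx_alt polling_strategy dataset_remain_count := by
  unfold generate_idx_to_dataset_idx generate_idx_to_dataset_idx_alt
  simp only [hb, hd, Bool.false_eq_true, if_false]
  rfl

-- ===== VERDICT (by name: the statement is the Claim_ definition above) =====
theorem generate_idx_to_dataset_idx_spec : Claim_equal_generate_idx_to_dataset_idx := by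
  intro polling_strategy dataset_remain_count _ hpre
  unfold Spec_generate_idx_to_dataset_idx
  by_cases hb : polling_strategy == "batch_wise"
  · exact pv_main _ _ hpre.1 (hpre.2 (Or.inl (eq_of_beq hb)))
  · by_cases hd : polling_strategy == "dataset_wise"
    · exact pv_main _ _ hpre.1 (hpre.2 (Or.inr (eq_of_beq hd)))
    · exact pv_main_other _ _ (eq_false_of_ne_true hb) (eq_false_of_ne_true hd)
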